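-- pv_equiv track=rewrite | github.com/nikgrinding/AOC | AOC25/day-06/2.py | part_2
-- ===== SOURCE A (Python) =====
-- def part_2(ip):
--
--     ops, ip = ip[-1], ip[:-1]
--
--     answer = 0
--
--     d = {}
--     reordered = []
--
--     for i in range(len(ip[0])):
--         if ops[i] in ['+', '*']:
--             if d: reordered.append([int(i) for i in list(d.values()) if i.strip()])
--             d = {}
--         for j in range(len(ip)):
--             d[i] = d.get(i, '') + ip[j][i]
--     reordered.append([int(i) for i in list(d.values()) if i.strip()])
--
--     ops = ops.split()
--
--     for i in range(len(reordered)):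
--         if ops[i] == '+': answer += sum(reordered[i])
--         else:
--             temp = 1
--             for val in reordered[i]: temp *= val
--             answer += temp
--
--     return answer
-- ===== SOURCE B (Python) =====
-- def part_2(ip):
--     ops_row, grid = ip[-1], ip[:-1]
--     width = len(grid[0])
--     cols = [''.join(row[i] for row in grid) for i in range(width)]
--     bounds = [0] + [i for i in range(1, width) if ops_row[i] in '+*'] + [width]
--     answer = 0
--     for tok, (a, b) in zip(ops_row.split(), zip(bounds, bounds[1:])):
--         nums = [int(s) for s in cols[a:b] if s.strip()]
--         if tok == '+':
--             answer += sum(nums)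
--         else:
--             p = 1
--             for v in nums:
--                 p *= v
--
--             answer += p
--     return answer
-- ===== Notes on version B (the rewrite author's own statement) =====
-- stated objective: simpler
-- what changed: A builds column strings through a dict keyed by column index inside one stateful pass that flushes groups at operator columns and then indexes the operator tokens by position; B first transposes the grid into a plain list of column strings, computes the group boundaries as an explicit bounds list in a separate pass over the operator row, and reduces by zipping the tokens with adjacent bounds pairs, with no dict and no mutable group state.
import Mathlib
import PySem

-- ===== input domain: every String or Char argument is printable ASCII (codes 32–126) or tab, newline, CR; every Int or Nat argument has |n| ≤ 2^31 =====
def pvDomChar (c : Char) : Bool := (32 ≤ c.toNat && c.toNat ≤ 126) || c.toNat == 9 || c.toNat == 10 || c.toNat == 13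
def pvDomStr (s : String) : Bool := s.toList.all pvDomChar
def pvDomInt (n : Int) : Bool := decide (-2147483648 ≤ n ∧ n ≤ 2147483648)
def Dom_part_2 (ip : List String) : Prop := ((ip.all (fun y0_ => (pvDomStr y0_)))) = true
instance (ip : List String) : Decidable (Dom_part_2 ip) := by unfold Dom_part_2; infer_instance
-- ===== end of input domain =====

-- B replaces A's dict-and-flush single pass by a transpose, an explicit bounds list and a
-- token/bounds zip (objective: simpler); same return value on every input A returns on.

-- ===== PORT A =====
-- the list comprehension [int(v) for v in list(d.values()) if v.strip()] (appears twice in A)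
def aConv (d : PySem.Dict Int (List Char)) : List Int :=
  (d.values.filter (fun s => decide (PySem.Chars.strip s ≠ []))).map
    (fun s => (PySem.Int.ofChars? s).getD 0)

-- A's inner loop over row indices j, appending column i's characters into the dict
def aInner (grid : List String) (i : Int)
    (st : PySem.Dict Int (List Char) × List (List Int)) :
    PySem.Dict Int (List Char) × List (List Int) :=
  ((PySem.List.pyRange 0 (grid.length : Int) 1).foldl
      (fun d j =>
        d.insert i (d.getD i [] ++ [PySem.List.pyGetD (PySem.List.pyGetD grid j "").toList i ' ']))
      st.1,
   st.2)

-- the body of A's outer loop over column indices i (ops = last line, grid = ip[:-1])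
def aBody (ops : List Char) (grid : List String)
    (st : PySem.Dict Int (List Char) × List (List Int)) (i : Int) :
    PySem.Dict Int (List Char) × List (List Int) :=
  aInner grid i
    (if PySem.List.pyGetD ops i ' ' ∈ ['+', '*'] then
      (PySem.Dict.empty, if st.1.size ≠ 0 then st.2 ++ [aConv st.1] else st.2)
    else st)

def part_2 (ip : List String) : Int :=
  let ops : List Char := (PySem.List.pyGetD ip (-1) "").toList
  let ip := PySem.List.slice ip none (some (-1))
  let w : Int := PySem.Str.len (PySem.List.pyGetD ip 0 "")
  let st := (PySem.List.pyRange 0 w 1).foldl (aBody ops ip) (PySem.Dict.empty, [])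
  let reordered := st.2 ++ [aConv st.1]
  let opsT := PySem.Chars.split₀ ops
  (PySem.List.pyRange 0 (reordered.length : Int) 1).foldl
    (fun answer i =>
      if PySem.List.pyGetD opsT i [] = ['+'] then
        answer + (PySem.List.pyGetD reordered i []).sum
      else
        answer + (PySem.List.pyGetD reordered i []).foldl (· * ·) 1)
    0

-- ===== PORT B =====
def part_2_alt (ip : List String) : Int :=
  let ops : List Char := (PySem.List.pyGetD ip (-1) "").toList
  let grid := PySem.List.slice ip none (some (-1))
  let width : Int := PySem.Str.len (PySem.List.pyGetD grid 0 "")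
  let cols : List (List Char) :=
    (PySem.List.pyRange 0 width 1).map
      (fun i => grid.map (fun row => PySem.List.pyGetD row.toList i ' '))
  let bounds : List Int :=
    0 :: (PySem.List.pyRange 1 width 1).filter (fun i => PySem.List.pyGetD ops i ' ' ∈ ['+', '*'])
      ++ [width]
  ((PySem.Chars.split₀ ops).zip (bounds.zip (PySem.List.slice bounds (some 1) none))).foldl
    (fun answer x =>
      let nums :=
        ((PySem.List.slice cols (some x.2.1) (some x.2.2)).filter
            (fun s => decide (PySem.Chars.strip s ≠ []))).map
          (fun s => (PySem.Int.ofChars? s).getD 0)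
      if x.1 = ['+'] then answer + nums.sum
      else answer + nums.foldl (· * ·) 1)
    0

-- ===== PRECONDITION & SPEC =====
-- does the character of the operator row at column i mark a group boundary?
def opChar (ops : List Char) (i : Nat) : Bool :=
  ops.getD i ' ' == '+' || ops.getD i ' ' == '*'

-- the i-th column of the grid, read top to bottom
def colF (grid : List String) (i : Nat) : List Char :=
  grid.map (fun r => r.toList.getD i ' ')

-- Pre_ holds exactly where the Python A returns normally: at least two lines; the operator
-- row and every grid row cover the first grid row's width; every non-blank column parses as
-- an int; and there are at least as many whitespace-separated operator tokens as groups.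
def Pre_part_2 (ip : List String) : Prop :=
  2 ≤ ip.length ∧
  (let ops := (ip.getLast?.getD "").toList
   let grid := ip.dropLast
   let w := (grid.headD "").toList.length
   w ≤ ops.length ∧ (∀ r ∈ grid, w ≤ r.toList.length) ∧
   (∀ i : Nat, i < w → PySem.Chars.strip (colF grid i) ≠ [] → (PySem.Int.ofChars? (colF grid i)).isSome) ∧
   1 + (List.range w).countP (fun i => decide (0 < i) && opChar ops i)
     ≤ (PySem.Chars.split₀ ops).length)

instance (ip : List String) : Decidable (Pre_part_2 ip) := by unfold Pre_part_2; infer_instance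

def pvWitness_part_2 : List String := ["12", "34", "+ "]

def Spec_part_2 (ip : List String) (out : Int) : Prop := out = part_2_alt ip
instance (ip : List String) (out : Int) : Decidable (Spec_part_2 ip out) := by
  unfold Spec_part_2; infer_instance

-- ===== CLAIM (what is proved, stated in full; the proofs are below) =====
def Claim_equal_part_2 : Prop :=
  ∀ (ip : List String), Dom_part_2 ip → Pre_part_2 ip → Spec_part_2 ip (part_2 ip)

-- ===== LEMMAS AND PROOFS =====

-- reference grouping: splitRef p cur l = (closed groups, current group) of A's flush loop
def splitRef (p : Nat → Bool) : List Nat → List Nat → List (List Nat) × List Nat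
  | cur, [] => ([], cur)
  | cur, x :: xs =>
      if p x = true ∧ cur ≠ [] then
        ((splitRef p [x] xs).1.cons cur, (splitRef p [x] xs).2)
      else splitRef p (cur ++ [x]) xs

-- the dict A has built while the current group holds the columns `cur`
def dictOf (grid : List String) (cur : List Nat) : PySem.Dict Int (List Char) :=
  PySem.Dict.mk (cur.map (fun i => (Int.ofNat i, colF grid i)))

-- the converted value of a group of column indices
def convCol (grid : List String) (g : List Nat) : List Int :=
  ((g.map (colF grid)).filter (fun s => decide (PySem.Chars.strip s ≠ []))).map
    (fun s => (PySem.Int.ofChars? s).getD 0)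

def seg (a b : Nat) : List Nat := List.range' a (b - a)

-- B's interior boundary columns
def blF (ops : List Char) (n : Nat) : List Nat := (List.range' 1 (n - 1)).filter (opChar ops)

def adjPairs (l : List Nat) : List (Nat × Nat) := l.zip l.tail

lemma pyRange_natCast_natCast (a b : Nat) :
    PySem.List.pyRange (a : Int) (b : Int) 1 = (List.range' a (b - a)).map (fun k : Nat => (k : Int)) := by
  induction b with
  | zero =>
      rw [PySem.List.pyRange_of_pos _ _ (by norm_num)]
      simp
  | succ b ih =>
      by_cases h : a ≤ b
      · rw [show ((b + 1 : Nat) : Int) = (b : Int) + 1 by push_cast; ring,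
            PySem.List.pyRange_one_succ_right (by exact_mod_cast h), ih,
            show b + 1 - a = (b - a) + 1 by omega, List.range'_concat]
        simp [show a + (b - a) = b by omega]
      · rw [PySem.List.pyRange_of_pos _ _ (by norm_num)]
        rw [if_neg (by exact_mod_cast (by omega : ¬ (a < b + 1)))]
        simp [show b + 1 - a = 0 by omega]

lemma pyGetD_neg_one {α : Type} (xs : List α) (d : α) (h : xs ≠ []) :
    PySem.List.pyGetD xs (-1) d = xs.getLast h := by
  have hl : 1 ≤ xs.length := List.length_pos_iff.mpr h
  simp only [PySem.List.pyGetD, PySem.List.pyGet?, PySem.List.pyIdx?, Int.reduceNeg,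
    Int.neg_nonneg, Int.reduceLE, ↓reduceIte, neg_le_neg_iff, Nat.one_le_cast, neg_neg,
    Int.toNat_one]
  rw [if_pos hl]
  simp [List.getElem?_eq_getElem (by omega : xs.length - 1 < xs.length),
        List.getLast_eq_getElem]

lemma slice_neg_one {α : Type} (xs : List α) :
    PySem.List.slice xs none (some (-1)) = xs.dropLast := by
  simp only [PySem.List.slice, Int.reduceNeg, Order.lt_one_iff, PySem.List.clampIdx_neg_ofNat,
    tsub_zero, List.drop_zero]
  exact List.dropLast_eq_take.symm

lemma inner_loop (grid : List String) (d : PySem.Dict Int (List Char)) (x : Nat)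
    (hg : grid ≠ []) (h : d.contains (x : Int) = false) :
    (PySem.List.pyRange 0 (grid.length : Int) 1).foldl
      (fun d j =>
        d.insert (x : Int)
          (d.getD (x : Int) [] ++
            [PySem.List.pyGetD (PySem.List.pyGetD grid j "").toList (x : Int) ' ']))
      d = d.insert (x : Int) (colF grid x) := by
  rw [PySem.List.pyRange_zero_natCast, List.foldl_map]
  have main : ∀ m, m ≤ grid.length →
      (List.range m).foldl
        (fun d (j : Nat) =>
          d.insert (x : Int)
            (d.getD (x : Int) [] ++
              [PySem.List.pyGetD (PySem.List.pyGetD grid (j : Int) "").toList (x : Int) ' ']))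
        d = if m = 0 then d else d.insert (x : Int) (colF (grid.take m) x) := by
    intro m
    induction m with
    | zero => simp
    | succ m ih =>
        intro hm
        rw [List.range_succ, List.foldl_append, ih (by omega)]
        have hrow : PySem.List.pyGetD grid (m : Int) "" = grid[m] := by
          rw [PySem.List.pyGetD_natCast]
          exact List.getD_eq_getElem _ _ (by omega)
        have hchar : PySem.List.pyGetD (grid[m]).toList (x : Int) ' ' = (grid[m]).toList.getD x ' ' := by
          rw [PySem.List.pyGetD_natCast]
        have htake : colF (grid.take (m+1)) x = colF (grid.take m) x ++ [(grid[m]).toList.getD x ' '] := by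
          unfold colF
          rw [List.take_add_one, List.getElem?_eq_getElem (by omega), Option.toList_some,
              List.map_append]
          rfl
        by_cases hm0 : m = 0
        · subst hm0
          simp only [reduceIte, Nat.succ_ne_zero, List.foldl_cons, List.foldl_nil, Nat.cast_zero]
          rw [PySem.Dict.getD_of_not_contains _ _ h]
          rw [show ((0 : Nat) : Int) = (0 : Int) from rfl] at hrow
          rw [hrow, hchar, htake]
          simp [colF]
        · rw [if_neg hm0, if_neg (Nat.succ_ne_zero m)]
          simp only [List.foldl_cons, List.foldl_nil]
          rw [PySem.Dict.getD_insert_self, PySem.Dict.insert_insert_self, hrow, hchar, htake]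
  rw [main grid.length le_rfl, if_neg (by simpa using List.length_pos_iff.mpr hg |>.ne'),
      List.take_of_length_le le_rfl]

lemma dictOf_contains (grid : List String) (cur : List Nat) (x : Nat) (h : x ∉ cur) :
    (dictOf grid cur).contains (x : Int) = false := by
  simp [dictOf, PySem.Dict.contains_mk, List.any_map]
  intro i hi hxi
  exact absurd (by exact_mod_cast hxi : i = x) (fun e => h (e ▸ hi))

lemma dictOf_insert (grid : List String) (cur : List Nat) (x : Nat) (h : x ∉ cur) :
    (dictOf grid cur).insert (x : Int) (colF grid x) = dictOf grid (cur ++ [x]) := by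
  apply PySem.Dict.ext
  rw [PySem.Dict.items_insert_of_not_contains _ _ (dictOf_contains grid cur x h)]
  simp [dictOf]

lemma aConv_dictOf (grid : List String) (cur : List Nat) :
    aConv (dictOf grid cur) = convCol grid cur := by
  unfold aConv convCol
  simp [dictOf, PySem.Dict.values]
  congr 1

lemma A_loop (ops : List Char) (grid : List String) (hg : grid ≠ []) :
    ∀ (l : List Nat) (cur : List Nat) (gs : List (List Int)),
      l.Pairwise (· < ·) → (∀ x ∈ l, ∀ c ∈ cur, c < x) →
      (l.map (fun n : Nat => (n : Int))).foldl (aBody ops grid) (dictOf grid cur, gs) =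
        (dictOf grid (splitRef (opChar ops) cur l).2,
         gs ++ ((splitRef (opChar ops) cur l).1).map (convCol grid)) := by
  intro l
  induction l with
  | nil =>
      intro cur gs _ _
      rw [splitRef]
      dsimp only
      rw [List.map_nil, List.foldl_nil, List.map_nil, List.append_nil]
  | cons x xs ih =>
      intro cur gs hpw hlt
      obtain ⟨hx, hpw'⟩ := List.pairwise_cons.mp hpw
      have hxcur : x ∉ cur := fun hmem => lt_irrefl x (hlt x (List.mem_cons_self) x hmem)
      have htest : (PySem.List.pyGetD ops (x : Int) ' ' ∈ ['+', '*']) ↔ opChar ops x = true := by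
        rw [PySem.List.pyGetD_natCast]
        simp [opChar]
      have hsize : ((dictOf grid cur).size ≠ 0) ↔ cur ≠ [] := by
        simp [dictOf, PySem.Dict.size]
      simp only [List.map_cons, List.foldl_cons]
      by_cases hop : opChar ops x = true
      · by_cases hcur : cur ≠ []
        · have hbody : aBody ops grid (dictOf grid cur, gs) (x : Int) =
              (dictOf grid [x], gs ++ [convCol grid cur]) := by
            unfold aBody
            rw [if_pos (htest.mpr hop), if_pos (hsize.mpr hcur)]
            have : PySem.Dict.empty = dictOf grid [] := rfl
            simp only [this]
            unfold aInner
            dsimp only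
            rw [inner_loop grid _ x hg (dictOf_contains grid [] x (by simp)),
                dictOf_insert grid [] x (by simp), aConv_dictOf]
            rfl
          rw [hbody, ih [x] (gs ++ [convCol grid cur]) hpw'
              (fun y hy c hc => by rw [List.mem_singleton.mp hc]; exact hx y hy)]
          have hsp : splitRef (opChar ops) cur (x :: xs) =
              ((splitRef (opChar ops) [x] xs).1.cons cur, (splitRef (opChar ops) [x] xs).2) := by
            rw [splitRef]
            rw [if_pos ⟨hop, hcur⟩]
          rw [hsp]
          simp
        · rw [not_ne_iff] at hcur
          subst hcur
          have hbody : aBody ops grid (dictOf grid [], gs) (x : Int) =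
              (dictOf grid [x], gs) := by
            unfold aBody
            rw [if_pos (htest.mpr hop), if_neg (by simp [dictOf, PySem.Dict.size])]
            have : PySem.Dict.empty = dictOf grid [] := rfl
            simp only [this]
            unfold aInner
            dsimp only
            rw [inner_loop grid _ x hg (dictOf_contains grid [] x (by simp)),
                dictOf_insert grid [] x (by simp)]
            rfl
          rw [hbody, ih [x] gs hpw'
              (fun y hy c hc => by rw [List.mem_singleton.mp hc]; exact hx y hy)]
          have hsp : splitRef (opChar ops) [] (x :: xs) = splitRef (opChar ops) [x] xs := by
            rw [splitRef]
            simp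
          rw [hsp]
      · have hbody : aBody ops grid (dictOf grid cur, gs) (x : Int) =
            (dictOf grid (cur ++ [x]), gs) := by
          unfold aBody
          rw [if_neg (fun hmem => hop (htest.mp hmem))]
          unfold aInner
          dsimp only
          rw [inner_loop grid _ x hg (dictOf_contains grid cur x hxcur),
              dictOf_insert grid cur x hxcur]
        rw [hbody, ih (cur ++ [x]) gs hpw'
            (fun y hy c hc => by
              rcases List.mem_append.mp hc with h | h
              · exact lt_trans (hlt _ (List.mem_cons_self) _ h) (hx y hy)
              · rw [List.mem_singleton.mp h]; exact hx y hy)]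
        have hsp : splitRef (opChar ops) cur (x :: xs) = splitRef (opChar ops) (cur ++ [x]) xs := by
          rw [splitRef]
          rw [if_neg (fun hh => hop hh.1)]
        rw [hsp]

lemma splitRef_snoc (p : Nat → Bool) :
    ∀ (l : List Nat) (cur : List Nat) (x : Nat),
      splitRef p cur (l ++ [x]) =
        (let s := splitRef p cur l
         if p x = true ∧ s.2 ≠ [] then (s.1 ++ [s.2], [x]) else (s.1, s.2 ++ [x])) := by
  intro l
  induction l with
  | nil =>
      intro cur x
      by_cases h : p x = true ∧ cur ≠ [] <;>
        simp [splitRef, h]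
  | cons y l ihl =>
      intro cur x
      rw [List.cons_append, splitRef, splitRef]
      by_cases h : p y = true ∧ cur ≠ []
      · rw [if_pos h, if_pos h, ihl]
        dsimp only
        by_cases h2 : p x = true ∧ (splitRef p [y] l).2 ≠ []
        · rw [if_pos h2, if_pos h2]
          simp
        · rw [if_neg h2, if_neg h2]
      · rw [if_neg h, if_neg h, ihl]

lemma adjPairs_concat (l : List Nat) (h : l ≠ []) (x : Nat) :
    adjPairs (l ++ [x]) = adjPairs l ++ [(l.getLast?.getD 0, x)] := by
  induction l with
  | nil => exact absurd rfl h
  | cons a l ihl =>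
      cases l with
      | nil => rfl
      | cons b l =>
          have := ihl (by simp)
          unfold adjPairs at this ⊢
          simp only [List.cons_append, List.tail_cons, List.zip_cons_cons] at this ⊢
          rw [this]
          simp

lemma L2inv (ops : List Char) (n : Nat) :
    (splitRef (opChar ops) [] (List.range n)).1 =
        (adjPairs (0 :: blF ops n)).map (fun p => seg p.1 p.2) ∧
      (splitRef (opChar ops) [] (List.range n)).2 = seg ((0 :: blF ops n).getLast?.getD 0) n ∧
      (0 :: blF ops n).getLast?.getD 0 ≤ n ∧ (0 < n → (0 :: blF ops n).getLast?.getD 0 < n) := by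
  induction n with
  | zero =>
      refine ⟨?_, ?_, ?_, ?_⟩ <;> simp [splitRef, blF, adjPairs, seg]
  | succ n ih =>
      obtain ⟨h1, h2, h3, h4⟩ := ih
      have hL : (0 :: blF ops n).getLast?.getD 0 ≤ n := h3
      have hne : (0 :: blF ops n) ≠ [] := by simp
      rw [List.range_succ, splitRef_snoc]
      have hcond : (opChar ops n = true ∧ (splitRef (opChar ops) [] (List.range n)).2 ≠ []) ↔
          (opChar ops n = true ∧ 0 < n) := by
        rw [h2]
        constructor
        · rintro ⟨ho, hne2⟩
          refine ⟨ho, ?_⟩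
          by_contra h0
          have : n = 0 := by omega
          subst this
          have : (0 :: blF ops 0).getLast?.getD 0 = 0 := by simp [blF]
          rw [this] at hne2
          simp [seg] at hne2
        · rintro ⟨ho, h0⟩
          have hlt := h4 h0
          refine ⟨ho, ?_⟩
          unfold seg
          intro hc
          have hlc := congrArg List.length hc
          rw [List.length_range'] at hlc
          simp at hlc
          omega
      by_cases hOp : opChar ops n = true ∧ 0 < n
      · have hbl : blF ops (n + 1) = blF ops n ++ [n] := by
          unfold blF
          rw [show (n + 1) - 1 = (n - 1) + 1 by omega, List.range'_concat,
              List.filter_append]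
          simp [show 1 + 1 * (n - 1) = n by omega, show 1 + (n - 1) = n by omega, hOp.1]
        rw [if_pos (hcond.mpr hOp)]
        refine ⟨?_, ?_, ?_, ?_⟩
        · dsimp only
          rw [h1, h2, hbl, show (0 : Nat) :: (blF ops n ++ [n]) = (0 :: blF ops n) ++ [n] by rfl,
              adjPairs_concat _ hne, List.map_append]
          simp
        · dsimp only
          have hgl : ((0 : Nat) :: blF ops (n + 1)).getLast?.getD 0 = n := by
            rw [hbl, show (0 : Nat) :: (blF ops n ++ [n]) = (0 :: blF ops n) ++ [n] by rfl,
               List.getLast?_concat]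
            rfl
          rw [hgl]
          simp [seg, show (n + 1) - n = 1 by omega, List.range'_one]
        · have hgl : ((0 : Nat) :: blF ops (n + 1)).getLast?.getD 0 = n := by
            rw [hbl, show (0 : Nat) :: (blF ops n ++ [n]) = (0 :: blF ops n) ++ [n] by rfl,
               List.getLast?_concat]
            rfl
          rw [hgl]
          omega
        · intro _
          have hgl : ((0 : Nat) :: blF ops (n + 1)).getLast?.getD 0 = n := by
            rw [hbl, show (0 : Nat) :: (blF ops n ++ [n]) = (0 :: blF ops n) ++ [n] by rfl,
               List.getLast?_concat]
            rfl
          rw [hgl]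
          omega
      · have hbl : blF ops (n + 1) = blF ops n := by
          by_cases h0 : n = 0
          · subst h0; rfl
          · unfold blF
            rw [show (n + 1) - 1 = (n - 1) + 1 by omega, List.range'_concat,
                List.filter_append]
            have : opChar ops n = false := by
              cases hoc : opChar ops n
              · rfl
              · exact absurd ⟨hoc, by omega⟩ hOp
            simp [show 1 + 1 * (n - 1) = n by omega, show 1 + (n - 1) = n by omega, this]
        rw [if_neg (fun hc => hOp (hcond.mp hc))]
        refine ⟨?_, ?_, ?_, ?_⟩
        · dsimp only
          rw [h1, hbl]
        · dsimp only
          rw [h2, hbl]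
          unfold seg
          rw [show (n + 1) - (0 :: blF ops n).getLast?.getD 0 = (n - (0 :: blF ops n).getLast?.getD 0) + 1
                by omega,
              List.range'_concat]
          congr 2
          omega
        · rw [hbl]; omega
        · intro _; rw [hbl]; omega

lemma adjPairs_rel {R : Nat → Nat → Prop} :
    ∀ (l : List Nat), l.Pairwise R → ∀ p ∈ adjPairs l, R p.1 p.2 := by
  intro l
  induction l with
  | nil => intro _ p hp; simp [adjPairs] at hp
  | cons a l ihl =>
      intro hpw p hp
      cases l with
      | nil => simp [adjPairs] at hp
      | cons b l =>
          obtain ⟨ha, hpw'⟩ := List.pairwise_cons.mp hpw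
          unfold adjPairs at hp
          simp only [List.tail_cons, List.zip_cons_cons, List.mem_cons] at hp
          rcases hp with rfl | hp
          · exact ha b (List.mem_cons_self)
          · exact ihl hpw' p hp

lemma adjPairs_snd_mem : ∀ (l : List Nat), ∀ p ∈ adjPairs l, p.2 ∈ l := by
  intro l p hp
  have h2 : p.2 ∈ l.tail := (List.of_mem_zip hp).2
  exact List.mem_of_mem_tail h2

lemma zip_map_getD {γ : Type} (f : List Char → γ → Int) (dγ : γ) :
    ∀ (P : List γ) (toks : List (List Char)), P.length ≤ toks.length →
      (toks.zip P).map (fun x => f x.1 x.2) =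
        (List.range P.length).map (fun i => f (toks.getD i []) (P.getD i dγ)) := by
  intro P
  induction P with
  | nil => intro toks _; simp
  | cons q P ihP =>
      intro toks hlen
      cases toks with
      | nil => simp at hlen
      | cons t toks =>
          simp only [List.zip_cons_cons, List.map_cons, List.length_cons, List.range_succ_eq_map,
            List.map_map]
          rw [ihP toks (by simpa using hlen)]
          simp [Function.comp_def]

lemma take_range' : ∀ (m k a : Nat), (List.range' a k).take m = List.range' a (min m k) := by
  intro m
  induction m with
  | zero => intro k a; simp
  | succ m ihm =>
      intro k a
      cases k with
      | zero => simp
      | succ k =>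
          rw [List.range'_succ, List.take_succ_cons, ihm, Nat.succ_min_succ, List.range'_succ]

lemma getD_zero_headD (l : List String) :
    PySem.List.pyGetD l 0 "" = l.headD "" := by
  rw [show (0 : Int) = ((0 : Nat) : Int) from rfl, PySem.List.pyGetD_natCast]
  cases l <;> rfl

lemma countP_blF (ops : List Char) (n : Nat) :
    (List.range n).countP (fun i => decide (0 < i) && opChar ops i) = (blF ops n).length := by
  cases n with
  | zero => simp [blF]
  | succ n =>
      rw [List.range_eq_range', show List.range' 0 (n + 1) = 0 :: List.range' 1 n by
            rw [List.range'_succ]]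
      rw [List.countP_cons]
      unfold blF
      rw [show (n + 1) - 1 = n from rfl, ← List.countP_eq_length_filter]
      have : (List.range' 1 n).countP (fun i => decide (0 < i) && opChar ops i) =
          (List.range' 1 n).countP (opChar ops) := by
        apply List.countP_congr
        intro x hx
        have : 1 ≤ x := (List.mem_range'_1.mp hx).1
        simp [show (0 < x) from this]
      rw [this]
      simp

lemma blF_mem (ops : List Char) (n : Nat) : ∀ x ∈ blF ops n, 1 ≤ x ∧ x < n := by
  intro x hx
  have hx' := List.mem_of_mem_filter hx
  have := List.mem_range'_1.mp hx'
  omega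

lemma pairwise_Bf (ops : List Char) (n : Nat) :
    ((0 : Nat) :: blF ops n ++ [n]).Pairwise (· ≤ ·) := by
  rw [List.pairwise_append]
  refine ⟨?_, by simp, ?_⟩
  · rw [List.pairwise_cons]
    refine ⟨fun x _ => by omega, ?_⟩
    exact (List.Pairwise.filter _ (List.pairwise_lt_range' 1)).imp (fun h => le_of_lt h)
  · intro x hx y hy
    rw [List.mem_singleton.mp hy]
    rcases List.mem_cons.mp hx with rfl | hx
    · omega
    · exact le_of_lt (blF_mem ops n x hx).2

lemma mem_Bf_le (ops : List Char) (n : Nat) : ∀ x ∈ (0 : Nat) :: blF ops n ++ [n], x ≤ n := by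
  intro x hx
  rcases List.mem_append.mp hx with hx | hx
  · rcases List.mem_cons.mp hx with rfl | hx
    · omega
    · exact le_of_lt (blF_mem ops n x hx).2
  · rw [List.mem_singleton.mp hx]

lemma getD_map_lt {α β : Type} (h : α → β) (Q : List α) (d : α) (d' : β)
    (k : Nat) (hk : k < Q.length) :
    (Q.map h).getD k d' = h (Q.getD k d) := by
  rw [List.getD_eq_getElem _ _ (by simpa using hk), List.getD_eq_getElem _ _ hk,
      List.getElem_map]

-- the reduction applied to one operator token and one converted group
def tokApply (t : List Char) (g : List Int) : Int :=
  if t = ['+'] then g.sum else g.foldl (· * ·) 1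

def segConv (grid : List String) (q : Nat × Nat) : List Int := convCol grid (seg q.1 q.2)

lemma pyRange_one_nat (b : Nat) :
    PySem.List.pyRange 1 (b : Int) 1 = (List.range' 1 (b - 1)).map (fun k : Nat => (k : Int)) := by
  have h := pyRange_natCast_natCast 1 b
  rw [Nat.cast_one] at h
  exact h

lemma final_loop (opsT : List (List Char))
    (h : Nat × Nat → List Int) (Q : List (Nat × Nat)) :
    List.foldl (fun (answer : Int) (k : Nat) =>
        if PySem.List.pyGetD opsT (k : Int) [] = ['+'] then
          answer + (PySem.List.pyGetD (Q.map h) (k : Int) []).sum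
        else
          answer + (PySem.List.pyGetD (Q.map h) (k : Int) []).foldl (· * ·) 1)
      0 (List.range (Q.map h).length)
      = ((List.range Q.length).map
          (fun k => tokApply (opsT.getD k []) (h (Q.getD k (0, 0))))).sum := by
  rw [List.length_map]
  have hcong : ∀ (answer : Int) (k : Nat), k ∈ List.range Q.length →
      (if PySem.List.pyGetD opsT (k : Int) [] = ['+'] then
          answer + (PySem.List.pyGetD (Q.map h) (k : Int) []).sum
        else
          answer + (PySem.List.pyGetD (Q.map h) (k : Int) []).foldl (· * ·) 1)
        = answer + tokApply (opsT.getD k []) (h (Q.getD k (0, 0))) := by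
    intro acc k hk
    simp only [PySem.List.pyGetD_natCast]
    rw [getD_map_lt h Q (0, 0) [] k (List.mem_range.mp hk)]
    unfold tokApply
    split_ifs <;> rfl
  refine Eq.trans (PySem.List.foldl_congr_mem _ _ _ _ hcong) ?_
  rw [PySem.List.foldl_add, zero_add]

lemma b_loop (opsT : List (List Char)) (grid : List String) (n : Nat) (Q : List (Nat × Nat))
    (hQ : ∀ q ∈ Q, q.1 ≤ q.2 ∧ q.2 ≤ n) (hlen : Q.length ≤ opsT.length) :
    List.foldl (fun (answer : Int) (x : List Char × (Int × Int)) =>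
        if x.1 = ['+'] then
          answer + (((PySem.List.slice ((List.range n).map (colF grid))
                (some x.2.1) (some x.2.2)).filter
              (fun s => decide (PySem.Chars.strip s ≠ []))).map
            (fun s => (PySem.Int.ofChars? s).getD 0)).sum
        else
          answer + (((PySem.List.slice ((List.range n).map (colF grid))
                (some x.2.1) (some x.2.2)).filter
              (fun s => decide (PySem.Chars.strip s ≠ []))).map
            (fun s => (PySem.Int.ofChars? s).getD 0)).foldl (· * ·) 1)
      0 (opsT.zip (Q.map (Prod.map (fun k : Nat => (k : Int)) (fun k : Nat => (k : Int)))))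
      = ((List.range Q.length).map
          (fun k => tokApply (opsT.getD k []) (segConv grid (Q.getD k (0, 0))))).sum := by
  rw [List.zip_map_right, List.foldl_map]
  have hcong : ∀ (answer : Int) (y : List Char × (Nat × Nat)), y ∈ opsT.zip Q →
      (fun (answer : Int) (x : List Char × (Int × Int)) =>
        if x.1 = ['+'] then
          answer + (((PySem.List.slice ((List.range n).map (colF grid))
                (some x.2.1) (some x.2.2)).filter
              (fun s => decide (PySem.Chars.strip s ≠ []))).map
            (fun s => (PySem.Int.ofChars? s).getD 0)).sum
        else
          answer + (((PySem.List.slice ((List.range n).map (colF grid))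
                (some x.2.1) (some x.2.2)).filter
              (fun s => decide (PySem.Chars.strip s ≠ []))).map
            (fun s => (PySem.Int.ofChars? s).getD 0)).foldl (· * ·) 1) answer
        (Prod.map id (Prod.map (fun k : Nat => (k : Int)) (fun k : Nat => (k : Int))) y)
        = answer + tokApply y.1 (segConv grid y.2) := by
    intro acc y hy
    obtain ⟨t, a, b⟩ := y
    have hq : (a, b) ∈ Q := (List.of_mem_zip hy).2
    obtain ⟨hab, hbn⟩ := hQ (a, b) hq
    simp only [Prod.map, id]
    rw [PySem.List.slice_natCast, ← List.map_drop, ← List.map_take,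
        List.range_eq_range', List.drop_range', take_range',
        show (0 + a * 1) = a by omega, show min (b - a) (n - a) = b - a by omega]
    unfold tokApply segConv convCol seg
    split_ifs <;> rfl
  refine Eq.trans (PySem.List.foldl_congr_mem _ _ _ _ hcong) ?_
  rw [PySem.List.foldl_add, zero_add]
  rw [zip_map_getD (fun t q => tokApply t (segConv grid q)) (0, 0) Q opsT hlen]

-- ===== VERDICT (by name: the statement is the Claim_ definition above) =====
theorem part_2_spec : Claim_equal_part_2 := by
  unfold Claim_equal_part_2
  intro ip _ hpre
  unfold Spec_part_2
  obtain ⟨hlen2, hpre2⟩ := hpre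
  have hne : ip ≠ [] := List.ne_nil_of_length_pos (by omega)
  have hglD : PySem.List.pyGetD ip (-1) "" = ip.getLast hne := pyGetD_neg_one ip "" hne
  have hls : (ip.getLast?.getD "") = ip.getLast hne := by
    rw [List.getLast?_eq_some_getLast hne]
    rfl
  have hgridne : ip.dropLast ≠ [] := by
    intro hh
    have h1 := List.length_dropLast (xs := ip)
    rw [hh] at h1
    simp at h1
    omega
  rw [hls] at hpre2
  obtain ⟨hw, hrows, hparse, htok⟩ := hpre2
  unfold part_2 part_2_alt
  simp only []
  rw [hglD, slice_neg_one, getD_zero_headD, PySem.Str.len_eq]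
  set opsL : List Char := (ip.getLast hne).toList with hopsLdef
  set grid : List String := ip.dropLast with hgriddef
  set n : Nat := (grid.headD "").toList.length with hndef
  set opsT : List (List Char) := PySem.Chars.split₀ opsL with hopsTdef
  set Bf : List Nat := (0 :: blF opsL n) ++ [n] with hBfdef
  set Q : List (Nat × Nat) := adjPairs Bf with hQdef
  -- shared facts
  have hQlen : Q.length ≤ opsT.length := by
    have hql : Q.length = (blF opsL n).length + 1 := by
      rw [hQdef, hBfdef]
      unfold adjPairs
      rw [List.length_zip, List.length_tail]
      simp
    rw [hql]
    calc (blF opsL n).length + 1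
        = 1 + (List.range n).countP (fun i => decide (0 < i) && opChar opsL i) := by
          rw [countP_blF]; omega
      _ ≤ opsT.length := htok
  have hQmem : ∀ q ∈ Q, q.1 ≤ q.2 ∧ q.2 ≤ n := by
    intro q hq
    exact ⟨adjPairs_rel Bf (pairwise_Bf opsL n) q hq,
           mem_Bf_le opsL n q.2 (adjPairs_snd_mem Bf q hq)⟩
  -- ===== A side =====
  rw [PySem.List.pyRange_zero_natCast,
      show (PySem.Dict.empty : PySem.Dict Int (List Char)) = dictOf grid [] from rfl,
      A_loop opsL grid hgridne (List.range n) [] [] List.pairwise_lt_range (by simp),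
      aConv_dictOf, List.nil_append]
  obtain ⟨hS1, hS2, hSle, hSlt⟩ := L2inv opsL n
  rw [hS1, hS2,
      show [convCol grid (seg ((0 :: blF opsL n).getLast?.getD 0) n)] =
        List.map (convCol grid) [seg ((0 :: blF opsL n).getLast?.getD 0) n] from rfl,
      ← List.map_append,
      show List.map (fun p => seg p.1 p.2) (adjPairs (0 :: blF opsL n)) ++
          [seg ((0 :: blF opsL n).getLast?.getD 0) n] =
        List.map (fun p => seg p.1 p.2)
          (adjPairs (0 :: blF opsL n) ++ [((0 :: blF opsL n).getLast?.getD 0, n)]) by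
        rw [List.map_append]; rfl,
      ← adjPairs_concat _ (by simp) n, ← hBfdef, ← hQdef, List.map_map]
  rw [PySem.List.pyRange_zero_natCast, List.foldl_map,
      final_loop opsT ((convCol grid) ∘ (fun p : Nat × Nat => seg p.1 p.2)) Q]
  -- ===== B side =====
  rw [List.map_map]
  rw [List.map_congr_left
      (g := colF grid)
      (by
        intro k _
        simp only [Function.comp_apply]
        unfold colF
        exact List.map_congr_left (fun r _ => by rw [PySem.List.pyGetD_natCast]))]
  rw [pyRange_one_nat n, List.filter_map]
  rw [List.filter_congr
      (q := opChar opsL)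
      (by
        intro k _
        simp only [Function.comp_apply]
        rw [PySem.List.pyGetD_natCast]
        unfold opChar
        rw [List.getD]
        by_cases h1 : opsL[k]?.getD ' ' = '+' <;> by_cases h2 : opsL[k]?.getD ' ' = '*' <;>
          simp [h1, h2])]
  rw [show ((0 : Int) :: List.map (fun k : Nat => (k : Int))
          ((List.range' 1 (n - 1)).filter (opChar opsL)) ++ [(n : Int)]) =
        Bf.map (fun k : Nat => (k : Int)) by
      rw [hBfdef]; unfold blF; simp]
  rw [PySem.List.slice_from _ (by norm_num), show ((1 : Int).toNat) = 1 from rfl, List.drop_one,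
      ← List.map_tail, List.zip_map, show Bf.zip Bf.tail = Q by rw [hQdef]; rfl]
  rw [b_loop opsT grid n Q hQmem hQlen]
  rfl
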